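-- pv_equiv track=rewrite | github.com/Salmagundi/ICT202-Twitter-Project | ICT_202_preprocessing.py | short_word_culler
-- ===== SOURCE A (Python) =====
-- def short_word_culler(doc_list): #doc_list is a list of strings
--     long_word_tweets = []
--     for tweet in doc_list:
--         long_word_tweets.append(
--             ' '.join([word for word in tweet.split() if len(word)>3])
--         )
--
--     long_word_tweets_list = [[word for word in tweet.split()] for tweet in long_word_tweets]
--     return long_word_tweets, long_word_tweets_list
-- ===== SOURCE B (Python) =====
-- def short_word_culler(doc_list):
--     long_word_tweets = []
--     long_word_tweets_list = []
--     for tweet in doc_list: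
--         words = [word for word in tweet.split() if len(word) > 3]
--         long_word_tweets.append(' '.join(words))
--         long_word_tweets_list.append(words)
--     return long_word_tweets, long_word_tweets_list
-- ===== Notes on version B (the rewrite author's own statement) =====
-- stated objective: simpler
-- what changed: B makes one pass computing the filtered word list once per tweet and appends both the joined string and the list, instead of A's two passes where the second re-splits the joined strings.
import Mathlib
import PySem

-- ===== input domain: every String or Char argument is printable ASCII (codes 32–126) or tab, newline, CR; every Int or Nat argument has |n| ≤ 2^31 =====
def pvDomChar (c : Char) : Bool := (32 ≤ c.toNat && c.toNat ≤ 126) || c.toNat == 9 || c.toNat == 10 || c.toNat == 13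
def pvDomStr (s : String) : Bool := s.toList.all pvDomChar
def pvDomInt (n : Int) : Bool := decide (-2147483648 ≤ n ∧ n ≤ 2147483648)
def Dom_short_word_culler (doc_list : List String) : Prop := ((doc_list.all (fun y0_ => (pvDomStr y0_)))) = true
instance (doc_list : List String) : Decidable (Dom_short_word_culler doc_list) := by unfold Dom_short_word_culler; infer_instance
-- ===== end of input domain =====

-- B fuses A's two passes into one loop that computes the filtered word list once per tweet (simpler; no re-split of the joined strings).

-- ===== PORT A =====
def short_word_culler (doc_list : List String) : List String × List (List String) :=
  let long_word_tweets :=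
    doc_list.foldl
      (fun acc tweet =>
        acc ++ [PySem.Str.join " " ((PySem.Str.split₀ tweet).filter (fun word => PySem.Str.len word > 3))])
      []
  let long_word_tweets_list :=
    long_word_tweets.map (fun tweet => (PySem.Str.split₀ tweet).map id)
  (long_word_tweets, long_word_tweets_list)

-- ===== PORT B =====
def short_word_culler_alt (doc_list : List String) : List String × List (List String) :=
  doc_list.foldl
    (fun (p : List String × List (List String)) tweet =>
      let words := (PySem.Str.split₀ tweet).filter (fun word => PySem.Str.len word > 3)
      (p.1 ++ [PySem.Str.join " " words], p.2 ++ [words]))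
    ([], [])

-- ===== PRECONDITION & SPEC =====
def Spec_short_word_culler (doc_list : List String) (out : List String × List (List String)) : Prop := out = short_word_culler_alt doc_list
instance (doc_list : List String) (out : List String × List (List String)) : Decidable (Spec_short_word_culler doc_list out) := by unfold Spec_short_word_culler; infer_instance

-- ===== CLAIM (what is proved, stated in full; the proofs are below) =====
def Claim_equal_short_word_culler : Prop := ∀ (doc_list : List String), Dom_short_word_culler doc_list → Spec_short_word_culler doc_list (short_word_culler doc_list)

-- ===== LEMMAS AND PROOFS =====

-- a word: nonempty and whitespace-free
def pvGoodWord (w : List Char) : Prop := w ≠ [] ∧ ∀ c ∈ w, PySem.Chars.isspace c = false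

-- every element produced by split₀.go beyond acc is a good word (given cur whitespace-free)
theorem pvGo_good (s : List Char) : ∀ (cur : List Char) (acc : List (List Char)),
    (∀ c ∈ cur, PySem.Chars.isspace c = false) →
    ∀ w ∈ PySem.Chars.split₀.go s cur acc, w ∈ acc ∨ pvGoodWord w := by
  induction s with
  | nil =>
    intro cur acc hcur w hw
    simp only [PySem.Chars.split₀.go] at hw
    split at hw
    · exact Or.inl (by simpa using hw)
    · rename_i hne
      have hc' : cur ≠ [] := by simpa [List.isEmpty_iff] using hne
      rcases (by simpa using hw : w ∈ acc ∨ w = cur.reverse) with h | h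
      · exact Or.inl h
      · subst h
        exact Or.inr ⟨by simpa using hc', fun c hc => hcur c (List.mem_reverse.1 hc)⟩
  | cons c rest ih =>
    intro cur acc hcur w hw
    simp only [PySem.Chars.split₀.go] at hw
    by_cases hsp : PySem.Chars.isspace c = true
    · rw [if_pos hsp] at hw
      split at hw
      · exact ih [] acc (by simp) w hw
      · rcases ih [] (cur.reverse :: acc) (by simp) w hw with h | h
        · rcases List.mem_cons.1 h with h | h
          · subst h
            rename_i hne
            have hc' : cur ≠ [] := by simpa [List.isEmpty_iff] using hne
            exact Or.inr ⟨by simpa using hc', fun a ha => hcur a (List.mem_reverse.1 ha)⟩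
          · exact Or.inl h
        · exact Or.inr h
    · rw [if_neg hsp] at hw
      refine ih (c :: cur) acc ?_ w hw
      intro a ha
      rcases List.mem_cons.1 ha with h | h
      · subst h; simpa using hsp
      · exact hcur a h

theorem pvSplit₀_good (s : List Char) : ∀ w ∈ PySem.Chars.split₀ s, pvGoodWord w := by
  intro w hw
  have := pvGo_good s [] [] (by simp) w hw
  simpa using this

-- consuming a whitespace-free chunk just accumulates it into cur
theorem pvGo_word (w : List Char) (hw : ∀ c ∈ w, PySem.Chars.isspace c = false) :
    ∀ (rest cur : List Char) (acc : List (List Char)),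
    PySem.Chars.split₀.go (w ++ rest) cur acc = PySem.Chars.split₀.go rest (w.reverse ++ cur) acc := by
  induction w with
  | nil => intro rest cur acc; simp
  | cons c t ih =>
    intro rest cur acc
    have hc : PySem.Chars.isspace c = false := hw c (List.mem_cons_self ..)
    simp only [List.cons_append, PySem.Chars.split₀.go, hc]
    rw [ih (fun a ha => hw a (List.mem_cons_of_mem _ ha)) rest (c :: cur) acc]
    simp

-- splitting the ' '-join of good words gives the words back
theorem pvSplit_join (ws : List (List Char)) (h : ∀ w ∈ ws, pvGoodWord w) :
    PySem.Chars.split₀ (PySem.Chars.join [' '] ws) = ws := by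
  have key : ∀ (ws : List (List Char)), (∀ w ∈ ws, pvGoodWord w) →
      ∀ acc, PySem.Chars.split₀.go (PySem.Chars.join [' '] ws) [] acc = acc.reverse ++ ws := by
    intro ws
    induction ws with
    | nil => intro _ acc; simp [PySem.Chars.join, List.intercalate, PySem.Chars.split₀.go]
    | cons w t ih =>
      intro hgood acc
      obtain ⟨hne, hws⟩ := hgood w (List.mem_cons_self ..)
      cases t with
      | nil =>
        simp only [PySem.Chars.join, List.intercalate, List.intersperse_single,
          List.flatten_singleton]
        rw [show w = w ++ ([] : List Char) from (List.append_nil w).symm, pvGo_word w hws]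
        simp only [PySem.Chars.split₀.go, List.append_nil]
        rw [if_neg (by simpa using hne)]
        simp
      | cons w' t' =>
        have hj : PySem.Chars.join [' '] (w :: w' :: t') = w ++ ' ' :: PySem.Chars.join [' '] (w' :: t') := by
          simp [PySem.Chars.join, List.intercalate, List.intersperse]
        rw [hj, pvGo_word w hws]
        simp only [List.append_nil, PySem.Chars.split₀.go]
        rw [if_pos (by decide), if_neg (by simpa using hne)]
        rw [ih (fun x hx => hgood x (List.mem_cons_of_mem _ hx)) (w.reverse.reverse :: acc)]
        simp
  have := key ws h []
  simpa [PySem.Chars.split₀] using this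

-- splitting the ' '-join of good-word strings gives them back (String level)
theorem pvSplit_join_str (ws : List String) (h : ∀ w ∈ ws, pvGoodWord w.toList) :
    PySem.Str.split₀ (PySem.Str.join " " ws) = ws := by
  simp only [PySem.Str.split₀, PySem.Str.join, String.toList_ofList]
  rw [show (" " : String).toList = [' '] from rfl]
  rw [pvSplit_join (ws.map String.toList) (by
    intro w hw
    rcases List.mem_map.1 hw with ⟨x, hx, rfl⟩
    exact h x hx)]
  rw [List.map_map]
  simp only [Function.comp_def, String.ofList_toList, List.map_id']

-- every word of a Python split is nonempty and whitespace-free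
theorem pvStrSplit₀_good (s : String) : ∀ w ∈ PySem.Str.split₀ s, pvGoodWord w.toList := by
  intro w hw
  simp only [PySem.Str.split₀] at hw
  rcases List.mem_map.1 hw with ⟨x, hx, rfl⟩
  rw [String.toList_ofList]
  exact pvSplit₀_good _ x hx

-- per-tweet: re-splitting the joined filtered words reproduces them
theorem pvResplit (tweet : String) :
    PySem.Str.split₀ (PySem.Str.join " " ((PySem.Str.split₀ tweet).filter (fun w => PySem.Str.len w > 3)))
      = (PySem.Str.split₀ tweet).filter (fun w => PySem.Str.len w > 3) := by
  exact pvSplit_join_str _ (fun w hw => pvStrSplit₀_good tweet w (List.mem_of_mem_filter hw))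

-- A's first accumulator is a map
theorem pvFoldl_map (f : String → String) (doc : List String) :
    ∀ init, doc.foldl (fun acc t => acc ++ [f t]) init = init ++ doc.map f := by
  induction doc with
  | nil => simp
  | cons d t ih => intro init; simp [List.foldl_cons, ih]

-- B's fold is a pair of maps
theorem pvAltFold (g : String → String) (h : String → List String) (doc : List String) :
    ∀ (p : List String × List (List String)),
    doc.foldl (fun p t => (p.1 ++ [g t], p.2 ++ [h t])) p = (p.1 ++ doc.map g, p.2 ++ doc.map h) := by
  induction doc with
  | nil => simp
  | cons d t ih => intro p; simp [List.foldl_cons, ih]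

-- ===== VERDICT (by name: the statement is the Claim_ definition above) =====
theorem short_word_culler_spec : Claim_equal_short_word_culler := by
  intro doc_list _
  unfold Spec_short_word_culler short_word_culler short_word_culler_alt
  rw [pvFoldl_map, pvAltFold]
  simp only [List.nil_append]
  refine Prod.ext rfl ?_
  rw [List.map_map]
  apply List.map_congr_left
  intro tweet _
  simp only [Function.comp_apply]
  rw [pvResplit]
  simp
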